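-- pv_equiv track=rewrite | github.com/PurthaShaariyaar/OA | test/p2.py | sentTimes
-- ===== SOURCE A (Python) =====
-- def sentTimes(numberOfPorts, transmissionTime, packetIds):
--   port_availability = [0] * numberOfPorts
--   final_ports = []
--
--   current_time = 1
--   for packetId in packetIds:
--     desired_port = packetId % numberOfPorts
--
--     while current_time < port_availability[desired_port]:
--       desired_port = (desired_port + 1) % numberOfPorts
--
--     port_availability[desired_port] = max(current_time, port_availability[desired_port]) + transmissionTime
--
--     final_ports.append(desired_port)
--     current_time += 1
--   return final_ports
-- ===== SOURCE B (Python) =====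
-- def _bisect_left(a, x):
--     lo, hi = 0, len(a)
--     while lo < hi:
--         mid = (lo + hi) // 2
--         if a[mid] < x:
--             lo = mid + 1
--         else:
--             hi = mid
--     return lo
--
--
-- def sentTimes(numberOfPorts, transmissionTime, packetIds):
--     free = list(range(numberOfPorts))   # sorted list of currently-free ports
--     pending = []                        # FIFO of (release_time, port), release times increasing
--     out = []
--     t = 1
--     for pid in packetIds:
--         # release every port whose busy interval has ended
--         while pending and pending[0][0] <= t:
--             p = pending.pop(0)[1]
--             free.insert(_bisect_left(free, p), p)
--         d0 = pid % numberOfPorts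
--         i = _bisect_left(free, d0)      # circular successor of d0 among free ports
--         if i == len(free):
--             i = 0
--         p = free.pop(i)
--         pending.append((t + transmissionTime, p))
--         out.append(p)
--         t += 1
--     return out
-- ===== Notes on version B (the rewrite author's own statement) =====
-- stated objective: alternative
-- what changed: replaces the per-port availability array with a circular while-probe by a sorted free-port list queried by hand-written binary search plus a FIFO of pending (release_time, port) pairs that re-frees ports lazily
import Mathlib
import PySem

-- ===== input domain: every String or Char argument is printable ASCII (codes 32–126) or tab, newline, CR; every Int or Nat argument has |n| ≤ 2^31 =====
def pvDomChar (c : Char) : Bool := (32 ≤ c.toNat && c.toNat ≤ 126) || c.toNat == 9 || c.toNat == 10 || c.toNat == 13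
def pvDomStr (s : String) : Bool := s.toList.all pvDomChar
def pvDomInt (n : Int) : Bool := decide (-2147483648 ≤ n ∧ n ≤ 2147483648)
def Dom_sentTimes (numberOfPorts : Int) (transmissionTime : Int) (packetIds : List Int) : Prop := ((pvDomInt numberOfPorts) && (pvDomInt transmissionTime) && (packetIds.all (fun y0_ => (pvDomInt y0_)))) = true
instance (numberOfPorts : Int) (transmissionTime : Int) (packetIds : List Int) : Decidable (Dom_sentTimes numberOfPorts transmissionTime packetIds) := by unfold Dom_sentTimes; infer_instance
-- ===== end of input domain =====

-- B replaces A's per-port availability array with circular probing by a sorted free-port list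
-- (hand-written binary search) plus a FIFO of pending (release-time, port) pairs: an alternative
-- algorithm of similar cost; return values proved equal on Pre_.


-- ===== PORT A =====
-- A's inner while loop: probe ports circularly until a free one is found.  The fuel
-- (len(port_availability)) only makes the search total in Lean; whenever a free port exists
-- (guaranteed inside Pre_) the first free port is reached before the fuel runs out, so the
-- result is exactly the Python loop's.
def pvFindA (avail : List Int) (t N : Int) : Int → Nat → Int
  | d, 0 => d
  | d, Nat.succ fuel =>
      if t < avail.getD d.toNat 0 then pvFindA avail t N (PySem.Int.mod (d + 1) N) fuel else d

-- one iteration of A's for-loop; state = (port_availability, current_time, final_ports)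
def pvStepA (N T : Int) (st : List Int × Int × List Int) (pid : Int) : List Int × Int × List Int :=
  let avail := st.1
  let t := st.2.1
  let d0 := PySem.Int.mod pid N
  let d := pvFindA avail t N d0 avail.length
  (avail.set d.toNat (max t (avail.getD d.toNat 0) + T), t + 1, st.2.2 ++ [d])

def sentTimes (numberOfPorts : Int) (transmissionTime : Int) (packetIds : List Int) : List Int :=
  (packetIds.foldl (pvStepA numberOfPorts transmissionTime)
    (List.replicate numberOfPorts.toNat 0, 1, [])).2.2

-- ===== PORT B =====
-- Source B's hand-written _bisect_left (its while loop, recursing on hi - lo)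
def pvBisect (a : List Int) (x : Int) (lo hi : Nat) : Nat :=
  if _h : lo < hi then
    if a.getD ((lo + hi) / 2) 0 < x then pvBisect a x ((lo + hi) / 2 + 1) hi
    else pvBisect a x lo ((lo + hi) / 2)
  else lo
termination_by hi - lo
decreasing_by all_goals omega

-- Source B's release loop: while pending and pending[0][0] <= t: insort the freed port
def pvRelease (t : Int) : List Int → List (Int × Int) → List Int × List (Int × Int)
  | free, [] => (free, [])
  | free, e :: rest =>
      if e.1 ≤ t then
        pvRelease t (free.insertIdx (pvBisect free e.2 0 free.length) e.2) rest
      else (free, e :: rest)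

-- one iteration of Source B's for-loop; state = (free, pending, out, t)
def pvStepB (N T : Int) (st : List Int × List (Int × Int) × List Int × Int) (pid : Int) :
    List Int × List (Int × Int) × List Int × Int :=
  let t := st.2.2.2
  let fp := pvRelease t st.1 st.2.1
  let free := fp.1
  let d0 := PySem.Int.mod pid N
  let i0 := pvBisect free d0 0 free.length
  let i := if i0 = free.length then 0 else i0
  let p := free.getD i 0
  (free.eraseIdx i, fp.2 ++ [(t + T, p)], st.2.2.1 ++ [p], t + 1)

def sentTimes_alt (numberOfPorts : Int) (transmissionTime : Int) (packetIds : List Int) : List Int :=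
  (packetIds.foldl (pvStepB numberOfPorts transmissionTime)
    (PySem.List.pyRange 0 numberOfPorts 1, [], [], 1)).2.2.1

-- ===== PRECONDITION & SPEC =====
-- Pre_ excludes exactly the inputs on which Python A does not return normally: a nonempty packet
-- list with numberOfPorts ≤ 0 (ZeroDivisionError / IndexError), and more packets than ports with
-- transmissionTime > numberOfPorts (once every port is busy A's while loop spins forever).
def Pre_sentTimes (numberOfPorts : Int) (transmissionTime : Int) (packetIds : List Int) : Prop :=
  packetIds = [] ∨
    (1 ≤ numberOfPorts ∧
      (transmissionTime ≤ numberOfPorts ∨ (packetIds.length : Int) ≤ numberOfPorts))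
instance (numberOfPorts : Int) (transmissionTime : Int) (packetIds : List Int) : Decidable (Pre_sentTimes numberOfPorts transmissionTime packetIds) := by unfold Pre_sentTimes; infer_instance

def pvWitness_sentTimes : Int × Int × List Int := (3, 2, [5, 1, 7, 4])

def Spec_sentTimes (numberOfPorts : Int) (transmissionTime : Int) (packetIds : List Int) (out : List Int) : Prop := out = sentTimes_alt numberOfPorts transmissionTime packetIds
instance (numberOfPorts : Int) (transmissionTime : Int) (packetIds : List Int) (out : List Int) : Decidable (Spec_sentTimes numberOfPorts transmissionTime packetIds out) := by unfold Spec_sentTimes; infer_instance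

-- ===== CLAIM (what is proved, stated in full; the proofs are below) =====
def Claim_equal_sentTimes : Prop := ∀ (numberOfPorts : Int) (transmissionTime : Int) (packetIds : List Int), Dom_sentTimes numberOfPorts transmissionTime packetIds → Pre_sentTimes numberOfPorts transmissionTime packetIds → Spec_sentTimes numberOfPorts transmissionTime packetIds (sentTimes numberOfPorts transmissionTime packetIds)

-- ===== LEMMAS AND PROOFS =====

-- the coupling invariant between A's state (avail, t) and B's state (free, pending, t)
def pvInv (N T t : Int) (avail free : List Int) (pending : List (Int × Int)) : Prop :=
  avail.length = N.toNat ∧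
  free.Pairwise (· < ·) ∧
  (pending.map Prod.fst).Pairwise (· < ·) ∧
  (∀ p ∈ free, 0 ≤ p ∧ p < N ∧ avail.getD p.toNat 0 ≤ t) ∧
  (∀ e ∈ pending, 0 ≤ e.2 ∧ e.2 < N ∧ avail.getD e.2.toNat 0 = e.1 ∧ e.1 ≤ t - 1 + T) ∧
  (free ++ pending.map Prod.snd).Perm (PySem.List.pyRange 0 N 1)

lemma pvGetD_set_self (l : List Int) (i : Nat) (v : Int) (h : i < l.length) :
    (l.set i v).getD i 0 = v := by
  simp [List.getD, h]

lemma pvGetD_set_ne (l : List Int) (i j : Nat) (v : Int) (h : i ≠ j) :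
    (l.set i v).getD j 0 = l.getD j 0 := by
  simp [List.getD, List.getElem?_set_ne h]

lemma pvBisect_le (a : List Int) (x : Int) :
    ∀ (n lo hi : Nat), hi - lo ≤ n → lo ≤ hi →
      lo ≤ pvBisect a x lo hi ∧ pvBisect a x lo hi ≤ hi := by
  intro n
  induction n with
  | zero =>
    intro lo hi h1 h2
    have h3 : ¬ lo < hi := by omega
    rw [pvBisect]; simp [h3]; omega
  | succ n ih =>
    intro lo hi h1 h2
    rw [pvBisect]
    by_cases h : lo < hi
    · simp only [h, dif_pos]
      by_cases hc : a.getD ((lo + hi) / 2) 0 < x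
      · simp only [hc, if_pos]
        have := ih ((lo + hi) / 2 + 1) hi (by omega) (by omega)
        omega
      · simp only [hc, if_false]
        have := ih lo ((lo + hi) / 2) (by omega) (by omega)
        omega
    · simp [h]; omega

lemma pvBisect_spec (a : List Int) (x : Int) (hs : a.Pairwise (· < ·)) :
    ∀ (n lo hi : Nat), hi - lo ≤ n → hi ≤ a.length → lo ≤ hi →
    (∀ j (_ : j < a.length), j < lo → a[j] < x) →
    (∀ j (_ : j < a.length), hi ≤ j → x ≤ a[j]) →
    (∀ j (_ : j < a.length), j < pvBisect a x lo hi → a[j] < x) ∧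
    (∀ j (_ : j < a.length), pvBisect a x lo hi ≤ j → x ≤ a[j]) := by
  have hmono : ∀ (i j : Nat) (hi : i < a.length) (hj : j < a.length), i < j → a[i] < a[j] :=
    fun i j hi hj hij => (List.pairwise_iff_getElem.mp hs) i j hi hj hij
  intro n
  induction n with
  | zero =>
    intro lo hi h1 hhi h2 hbefore hafter
    have h3 : ¬ lo < hi := by omega
    rw [pvBisect]
    simp only [h3, dif_neg, not_false_iff]
    exact ⟨hbefore, fun j hj hle => hafter j hj (by omega)⟩
  | succ n ih =>
    intro lo hi h1 hhi h2 hbefore hafter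
    rw [pvBisect]
    by_cases h : lo < hi
    · simp only [h, dif_pos]
      have hmidlt : (lo + hi) / 2 < a.length := by omega
      by_cases hc : a.getD ((lo + hi) / 2) 0 < x
      · simp only [hc, if_pos]
        have hcg : a[(lo + hi) / 2] < x := by
          have : a.getD ((lo + hi) / 2) 0 = a[(lo + hi) / 2] := List.getD_eq_getElem a 0 hmidlt
          omega
        refine ih ((lo + hi) / 2 + 1) hi (by omega) hhi (by omega) ?_ hafter
        intro j hj hjlt
        rcases Nat.lt_or_ge j ((lo + hi) / 2) with hlt | hge
        · exact lt_trans (hmono j _ hj hmidlt hlt) hcg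
        · have : j = (lo + hi) / 2 := by omega
          subst this; exact hcg
      · simp only [hc, if_false]
        have hcg : x ≤ a[(lo + hi) / 2] := by
          have : a.getD ((lo + hi) / 2) 0 = a[(lo + hi) / 2] := List.getD_eq_getElem a 0 hmidlt
          omega
        refine ih lo ((lo + hi) / 2) (by omega) (by omega) (by omega) hbefore ?_
        intro j hj hge
        rcases Nat.lt_or_ge j hi with hlt | hge2
        · rcases Nat.eq_or_lt_of_le hge with heq | hlt2
          · subst heq; exact hcg
          · exact le_of_lt (lt_of_le_of_lt hcg (hmono _ j hmidlt hj hlt2))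
        · exact hafter j hj hge2
    · simp only [h, dif_neg, not_false_iff]
      exact ⟨hbefore, fun j hj hle => hafter j hj (by omega)⟩

lemma pvInsort_spec (free : List Int) (p : Int) (hs : free.Pairwise (· < ·)) (hp : p ∉ free) :
    (free.insertIdx (pvBisect free p 0 free.length) p).Pairwise (· < ·) ∧
    (free.insertIdx (pvBisect free p 0 free.length) p).Perm (p :: free) := by
  have hle := pvBisect_le free p free.length 0 free.length (by omega) (by omega)
  have hspec := pvBisect_spec free p hs free.length 0 free.length (by omega) (le_refl _) (by omega)
      (by omega) (fun j hj hge => absurd hj (by omega))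
  have hperm : (free.insertIdx (pvBisect free p 0 free.length) p).Perm (p :: free) :=
    List.perm_insertIdx p free hle.2
  refine ⟨?_, hperm⟩
  -- strict bounds at the insertion point
  have hstrict : ∀ j (hj : j < free.length), pvBisect free p 0 free.length ≤ j → p < free[j] := by
    intro j hj hge
    have := hspec.2 j hj hge
    have : p ≠ free[j] := fun he => hp (he ▸ List.getElem_mem hj)
    omega
  -- prove Pairwise of insertIdx by a generic induction
  have main : ∀ (a : List Int) (r : Nat), a.Pairwise (· < ·) → r ≤ a.length →
      (∀ j (hj : j < a.length), j < r → a[j] < p) →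
      (∀ j (hj : j < a.length), r ≤ j → p < a[j]) →
      (a.insertIdx r p).Pairwise (· < ·) := by
    intro a
    induction a with
    | nil =>
      intro r _ hr _ _
      have : r = 0 := by simpa using hr
      subst this
      simp
    | cons hd tl ihtl =>
      intro r hpa hr hbef haft
      cases r with
      | zero =>
        simp only [List.insertIdx_zero]
        refine List.pairwise_cons.mpr ⟨?_, hpa⟩
        intro b hb
        rcases List.mem_iff_getElem.mp hb with ⟨j, hj, rfl⟩
        exact haft j hj (by omega)
      | succ r' =>
        rw [List.insertIdx_succ_cons]
        have hpatl := (List.pairwise_cons.mp hpa).2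
        have hhd := (List.pairwise_cons.mp hpa).1
        refine List.pairwise_cons.mpr ⟨?_, ?_⟩
        · intro b hb
          have hb' := List.mem_insertIdx (by simpa using Nat.le_of_succ_le_succ hr) |>.mp hb
          rcases hb' with rfl | hbtl
          · have h0 := hbef 0 (by simp) (by omega)
            simpa using h0
          · exact hhd b hbtl
        · refine ihtl r' hpatl (by simpa using hr) ?_ ?_
          · intro j hj hlt
            have := hbef (j + 1) (by simpa using Nat.succ_lt_succ hj) (by omega)
            simpa using this
          · intro j hj hge
            have := haft (j + 1) (by simpa using Nat.succ_lt_succ hj) (by omega)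
            simpa using this
  exact main free _ hs hle.2 (fun j hj hlt => hspec.1 j hj hlt) hstrict

-- release loop: splits pending at the first entry with release time > t, insorting the prefix
lemma pvRelease_spec (t : Int) :
    ∀ (pending : List (Int × Int)) (free : List Int),
      free.Pairwise (· < ·) → (pending.map Prod.fst).Pairwise (· < ·) →
      (free ++ pending.map Prod.snd).Nodup →
      ∃ l₁, pending = l₁ ++ (pvRelease t free pending).2 ∧
        (∀ e ∈ l₁, e.1 ≤ t) ∧ (∀ e ∈ (pvRelease t free pending).2, t < e.1) ∧
        (pvRelease t free pending).1.Pairwise (· < ·) ∧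
        (pvRelease t free pending).1.Perm (free ++ l₁.map Prod.snd) := by
  intro pending
  induction pending with
  | nil =>
    intro free hfs _ _
    exact ⟨[], by simp [pvRelease], by simp, by simp [pvRelease], by simpa [pvRelease], by simp [pvRelease]⟩
  | cons e rest ih =>
    intro free hfs hps hnd
    by_cases he : e.1 ≤ t
    · have hnotmem : e.2 ∉ free := fun hmem =>
        ((List.nodup_append.mp hnd).2.2 e.2 hmem e.2 (by simp)) rfl
      have hins := pvInsort_spec free e.2 hfs hnotmem
      set free₂ := free.insertIdx (pvBisect free e.2 0 free.length) e.2 with hfree₂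
      have hnd₂ : (free₂ ++ rest.map Prod.snd).Nodup := by
        have hperm₂ : (free₂ ++ rest.map Prod.snd).Perm (free ++ (e :: rest).map Prod.snd) :=
          (hins.2.append_right _).trans List.perm_middle.symm
        exact hperm₂.nodup_iff.mpr hnd
      have hps' : (rest.map Prod.fst).Pairwise (· < ·) := (List.pairwise_cons.mp hps).2
      have hstep : pvRelease t free (e :: rest) = pvRelease t free₂ rest := by
        rw [pvRelease, if_pos he, hfree₂]
      obtain ⟨l₁, hsplit, hl₁, hrest, hfs', hperm'⟩ := ih free₂ hins.1 hps' hnd₂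
      refine ⟨e :: l₁, ?_, ?_, ?_, ?_, ?_⟩
      · rw [hstep]; simpa using hsplit
      · intro x hx; rcases List.mem_cons.mp hx with rfl | hx
        · exact he
        · exact hl₁ x hx
      · rw [hstep]; exact hrest
      · rw [hstep]; exact hfs'
      · rw [hstep]
        exact hperm'.trans ((hins.2.append_right _).trans List.perm_middle.symm)
    · refine ⟨[], by simp [pvRelease, he], by simp, ?_, ?_, ?_⟩
      · rw [pvRelease]; simp only [he, if_false]
        intro x hx
        rcases List.mem_cons.mp hx with rfl | hx
        · omega
        · have h1 := (List.pairwise_cons.mp (by simpa using hps)).1 x.1 (List.mem_map_of_mem hx)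
          omega
      · rw [pvRelease]; simp [he, hfs]
      · rw [pvRelease]; simp [he]

lemma pvLength_le_of_pairwise_bounds :
    ∀ (l : List Int) (a b : Int), l.Pairwise (· < ·) → (∀ x ∈ l, a < x ∧ x ≤ b) →
      (l.length : Int) ≤ max (b - a) 0 := by
  intro l
  induction l with
  | nil =>
    intro a b _ _
    simp only [List.length_nil, Nat.cast_zero]
    exact le_max_right _ _
  | cons x rest ih =>
    intro a b hp hb
    have hx := hb x (by simp)
    have hrest := ih x b (List.pairwise_cons.mp hp).2
      (fun y hy => ⟨(List.pairwise_cons.mp hp).1 y hy, (hb y (by simp [hy])).2⟩)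
    simp only [List.length_cons]
    push_cast
    omega

lemma pvFindA_reach (avail : List Int) (t N : Int) (hN : 1 ≤ N) :
    ∀ (k : Nat) (d p : Int), 0 ≤ d → d ≤ p → p < N → (p - d).toNat = k →
    avail.getD p.toNat 0 ≤ t →
    (∀ q, d ≤ q → q < p → t < avail.getD q.toNat 0) →
    ∀ fuel, k < fuel → pvFindA avail t N d fuel = p := by
  intro k
  induction k with
  | zero =>
    intro d p hd hdp hpN hk hfree _ fuel hfuel
    have : d = p := by omega
    subst this
    cases fuel with
    | zero => omega
    | succ fuel => rw [pvFindA, if_neg (not_lt.mpr hfree)]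
  | succ k ih =>
    intro d p hd hdp hpN hk hfree hbusy fuel hfuel
    have hdp' : d < p := by omega
    cases fuel with
    | zero => omega
    | succ fuel =>
      have hbd : t < avail.getD d.toNat 0 := hbusy d (le_refl _) hdp'
      have hmod : PySem.Int.mod (d + 1) N = d + 1 := by
        rw [PySem.Int.mod_eq_emod_of_pos (by omega)]
        exact Int.emod_eq_of_lt (by omega) (by omega)
      simp only [pvFindA, hbd, if_pos, hmod]
      exact ih (d + 1) p (by omega) (by omega) hpN (by omega) hfree
        (fun q hq1 hq2 => hbusy q (by omega) hq2) fuel (by omega)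

lemma pvFindA_wrap (avail : List Int) (t N : Int) (hN : 1 ≤ N) :
    ∀ (k : Nat) (d : Int), 0 ≤ d → d < N → (N - d).toNat = k →
    (∀ q, d ≤ q → q < N → t < avail.getD q.toNat 0) →
    ∀ fuel, k ≤ fuel → pvFindA avail t N d fuel = pvFindA avail t N 0 (fuel - k) := by
  intro k
  induction k with
  | zero => intro d _ hdN hk; exfalso; omega
  | succ k ih =>
    intro d hd hdN hk hbusy fuel hfuel
    cases fuel with
    | zero => omega
    | succ fuel =>
      have hbd : t < avail.getD d.toNat 0 := hbusy d (le_refl _) hdN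
      by_cases hlast : d + 1 = N
      · have hk0 : k = 0 := by omega
        have hmod : PySem.Int.mod (d + 1) N = 0 := by
          rw [PySem.Int.mod_eq_emod_of_pos (by omega), hlast]
          simp
        rw [pvFindA, if_pos hbd, hmod, hk0]
        congr 1
      · have hmod : PySem.Int.mod (d + 1) N = d + 1 := by
          rw [PySem.Int.mod_eq_emod_of_pos (by omega)]
          exact Int.emod_eq_of_lt (by omega) (by omega)
        simp only [pvFindA, hbd, if_pos, hmod]
        have := ih (d + 1) (by omega) (by omega) (by omega)
          (fun q hq1 hq2 => hbusy q (by omega) hq2) fuel (by omega)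
        rw [this]
        congr 1
        omega

-- the main per-iteration lemma: from the invariant, both steps pick the same port
lemma pvStep_eq (N T t pid : Int) (avail free : List Int) (pending : List (Int × Int))
    (outA outB : List Int) (hN : 1 ≤ N)
    (hInv : pvInv N T t avail free pending)
    (hroom : T ≤ N ∨ (pending.length : Int) + 1 ≤ N) :
    ∃ p avail' free' pending',
      pvStepA N T (avail, t, outA) pid = (avail', t + 1, outA ++ [p]) ∧
      pvStepB N T (free, pending, outB, t) pid = (free', pending', outB ++ [p], t + 1) ∧
      pvInv N T (t + 1) avail' free' pending' ∧
      (pending'.length : Int) ≤ (pending.length : Int) + 1 := by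
  obtain ⟨hlen, hfs, hps, hfree3, hpend4, hperm⟩ := hInv
  have hnd : (free ++ pending.map Prod.snd).Nodup :=
    hperm.nodup_iff.mpr (PySem.List.nodup_pyRange_one 0 N)
  obtain ⟨l₁, hsplit, hl₁, hpd', hfs', hfperm'⟩ := pvRelease_spec t pending free hfs hps hnd
  set F := (pvRelease t free pending).1 with hFdef
  set P2 := (pvRelease t free pending).2 with hP2def
  -- facts about the post-release free list F
  have hmemF : ∀ q, q ∈ F ↔ q ∈ free ∨ q ∈ l₁.map Prod.snd := by
    intro q; rw [hfperm'.mem_iff, List.mem_append]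
  have hF3 : ∀ q ∈ F, 0 ≤ q ∧ q < N ∧ avail.getD q.toNat 0 ≤ t := by
    intro q hq
    rcases (hmemF q).mp hq with h | h
    · exact hfree3 q h
    · rcases List.mem_map.mp h with ⟨e, he, rfl⟩
      have h4 := hpend4 e (hsplit ▸ List.mem_append_left _ he)
      exact ⟨h4.1, h4.2.1, by rw [h4.2.2.1]; exact hl₁ e he⟩
  have hbusy : ∀ j : Int, 0 ≤ j → j < N → j ∉ F → t < avail.getD j.toNat 0 := by
    intro j hj0 hjN hjF
    have hjr : j ∈ free ++ pending.map Prod.snd :=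
      hperm.mem_iff.mpr ((PySem.List.mem_pyRange_one).mpr ⟨hj0, by omega⟩)
    rcases List.mem_append.mp hjr with h | h
    · exact absurd ((hmemF j).mpr (Or.inl h)) hjF
    · rcases List.mem_map.mp h with ⟨e, he, rfl⟩
      rw [hsplit] at he
      rcases List.mem_append.mp he with h1 | h1
      · exact absurd ((hmemF _).mpr (Or.inr (List.mem_map_of_mem h1))) hjF
      · have h4 := hpend4 e (hsplit ▸ List.mem_append_right _ h1)
        rw [h4.2.2.1]; exact hpd' e h1
  have hpermFP : (F ++ P2.map Prod.snd).Perm (free ++ pending.map Prod.snd) := by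
    refine (hfperm'.append_right _).trans ?_
    rw [List.append_assoc, ← List.map_append, ← hsplit]
  have hndF : (F ++ P2.map Prod.snd).Nodup := hpermFP.nodup_iff.mpr hnd
  have hFnodup : F.Nodup := (List.nodup_append.mp hndF).1
  have hdisjFP := (List.nodup_append.mp hndF).2.2
  -- counting: F is nonempty
  have hlensum : free.length + pending.length = N.toNat := by
    have h := hperm.length_eq
    simp only [List.length_append, List.length_map, PySem.List.length_pyRange_one] at h
    omega
  have hlenF : F.length = free.length + l₁.length := by
    have h := hfperm'.length_eq
    simpa using h
  have hlenpend : pending.length = l₁.length + P2.length := by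
    rw [hsplit]; simp
  have hpendmap : pending.map Prod.fst = l₁.map Prod.fst ++ P2.map Prod.fst := by
    rw [hsplit, List.map_append]
  have hP2fst : (P2.map Prod.fst).Pairwise (· < ·) := by
    have h := hps
    rw [hpendmap] at h
    exact (List.pairwise_append.mp h).2.1
  have hP2lt : P2.length < N.toNat := by
    rcases hroom with hT | hP
    · have hb : ∀ x ∈ P2.map Prod.fst, t < x ∧ x ≤ t - 1 + T := by
        intro x hx
        rcases List.mem_map.mp hx with ⟨e, he, rfl⟩
        exact ⟨hpd' e he, (hpend4 e (hsplit ▸ List.mem_append_right _ he)).2.2.2⟩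
      have hlb := pvLength_le_of_pairwise_bounds (P2.map Prod.fst) t (t - 1 + T) hP2fst hb
      simp only [List.length_map] at hlb
      omega
    · omega
  have hFpos : 0 < F.length := by omega
  -- the chosen port
  set d0 := PySem.Int.mod pid N with hd0def
  have hd0a : 0 ≤ d0 := PySem.Int.mod_nonneg (a := pid) (b := N) (by omega)
  have hd0b : d0 < N := PySem.Int.mod_lt (a := pid) (b := N) (by omega)
  set i0 := pvBisect F d0 0 F.length with hi0def
  have hle := pvBisect_le F d0 F.length 0 F.length (by omega) (by omega)
  have hspec := pvBisect_spec F d0 hfs' F.length 0 F.length (by omega) (le_refl _) (by omega)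
      (fun j hj hlt => absurd hlt (by omega)) (fun j hj hge => absurd hge (by omega))
  have hle2 := hle.2
  -- getD versions of the order facts (avoids dependent getElem rewriting)
  have hmonoD : ∀ (a b : Nat), a < b → b < F.length → F.getD a 0 < F.getD b 0 := by
    intro a b hab hb
    rw [List.getD_eq_getElem F 0 (by omega), List.getD_eq_getElem F 0 hb]
    exact (List.pairwise_iff_getElem.mp hfs') a b (by omega) hb hab
  have hspecD1 : ∀ j, j < F.length → j < i0 → F.getD j 0 < d0 := by
    intro j hj hlt
    rw [List.getD_eq_getElem F 0 hj]
    exact hspec.1 j hj hlt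
  have hspecD2 : ∀ j, j < F.length → i0 ≤ j → d0 ≤ F.getD j 0 := by
    intro j hj hge
    rw [List.getD_eq_getElem F 0 hj]
    exact hspec.2 j hj hge
  have hmemD : ∀ q, q ∈ F → ∃ j, j < F.length ∧ F.getD j 0 = q := by
    intro q hq
    rcases List.mem_iff_getElem.mp hq with ⟨j, hj, he⟩
    exact ⟨j, hj, by rw [List.getD_eq_getElem F 0 hj]; exact he⟩
  set i := if i0 = F.length then 0 else i0 with hidef
  have hiF : i < F.length := by rw [hidef]; split <;> omega
  set p := F.getD i 0 with hpdef
  have hpmem : p ∈ F := by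
    rw [hpdef, List.getD_eq_getElem F 0 hiF]
    exact List.getElem_mem hiF
  have hp3 := hF3 p hpmem
  set dA := pvFindA avail t N d0 avail.length with hdAdef
  -- A's circular probe finds exactly p
  have hfind : dA = p := by
    rw [hdAdef, hlen]
    by_cases hcase : i0 = F.length
    · -- wrap-around: no free port ≥ d0; p is the minimum free port
      have hpd0eq : p = F.getD 0 0 := by rw [hpdef, hidef, if_pos hcase]
      have hall : ∀ q ∈ F, q < d0 := by
        intro q hq
        rcases hmemD q hq with ⟨j, hj, hqe⟩
        rw [← hqe]
        exact hspecD1 j hj (by omega)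
      have hmin : ∀ q ∈ F, p ≤ q := by
        intro q hq
        rcases hmemD q hq with ⟨j, hj, hqe⟩
        rcases Nat.eq_zero_or_pos j with rfl | hjpos
        · rw [← hqe, hpd0eq]
        · rw [← hqe, hpd0eq]
          exact le_of_lt (hmonoD 0 j hjpos hj)
      have hbusy1 : ∀ q : Int, d0 ≤ q → q < N → t < avail.getD q.toNat 0 := by
        intro q h1 h2
        refine hbusy q (by omega) h2 ?_
        intro hq; exact absurd (hall q hq) (by omega)
      have hbusy2 : ∀ q : Int, 0 ≤ q → q < p → t < avail.getD q.toNat 0 := by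
        intro q h1 h2
        refine hbusy q h1 (by omega) ?_
        intro hq; exact absurd (hmin q hq) (by omega)
      have hpd0 : p < d0 := hall p hpmem
      rw [pvFindA_wrap avail t N hN (N - d0).toNat d0 hd0a hd0b rfl hbusy1 N.toNat (by omega)]
      exact pvFindA_reach avail t N hN p.toNat 0 p (le_refl 0) hp3.1 hp3.2.1 (by omega)
        hp3.2.2 (fun q h1 h2 => hbusy2 q h1 h2) (N.toNat - (N - d0).toNat) (by omega)
    · -- there is a free port ≥ d0; p is the least such
      have hi0lt : i0 < F.length := by omega
      have hpi0eq : p = F.getD i0 0 := by rw [hpdef, hidef, if_neg hcase]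
      have hple : d0 ≤ p := by
        rw [hpi0eq]
        exact hspecD2 i0 hi0lt (le_refl _)
      have hstrip : ∀ q : Int, d0 ≤ q → q < p → t < avail.getD q.toNat 0 := by
        intro q h1 h2
        refine hbusy q (by omega) (by omega) ?_
        intro hq
        rcases hmemD q hq with ⟨j, hj, hqe⟩
        rcases Nat.lt_or_ge j i0 with hlt | hge
        · have := hspecD1 j hj hlt
          omega
        · rcases Nat.eq_or_lt_of_le hge with heq | hlt2
          · rw [← heq] at hqe
            rw [hpi0eq] at h2
            omega
          · have := hmonoD i0 j hlt2 hj
            rw [hpi0eq] at h2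
            omega
      exact pvFindA_reach avail t N hN (p - d0).toNat d0 p hd0a hple hp3.2.1 rfl
        hp3.2.2 hstrip N.toNat (by omega)
  -- both steps produce the same port and the invariant is preserved
  set avail2 := avail.set p.toNat (t + T) with havail2
  set F' := F.eraseIdx i with hF'def
  set P' := P2 ++ [(t + T, p)] with hP'def
  have hmax : max t (avail.getD p.toNat 0) + T = t + T := by
    have h := hp3.2.2; omega
  have hA0 : pvStepA N T (avail, t, outA) pid =
      (avail.set dA.toNat (max t (avail.getD dA.toNat 0) + T), t + 1, outA ++ [dA]) := rfl
  have hA : pvStepA N T (avail, t, outA) pid = (avail2, t + 1, outA ++ [p]) := by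
    rw [hA0, hfind, hmax]
  have hB : pvStepB N T (free, pending, outB, t) pid = (F', P', outB ++ [p], t + 1) := rfl
  have hpermF : F.Perm (p :: F') := by
    have h := List.getElem_cons_eraseIdx_perm (l := F) (n := i) hiF
    have hip : F[i] = p := by rw [hpdef, List.getD_eq_getElem F 0 hiF]
    rw [hip] at h
    exact h.symm
  have hpnotF' : p ∉ F' := by
    have h1 : (p :: F').Nodup := hpermF.nodup_iff.mp hFnodup
    exact (List.nodup_cons.mp h1).1
  have hsubF' : ∀ q, q ∈ F' → q ∈ F := fun q hq => (List.eraseIdx_sublist F i).subset hq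
  have hptoNat : p.toNat < avail.length := by
    rw [hlen]; omega
  refine ⟨p, avail2, F', P', hA, hB, ⟨?_, ?_, ?_, ?_, ?_, ?_⟩, ?_⟩
  · rw [havail2]; simp [hlen]
  · exact hfs'.sublist (List.eraseIdx_sublist F i)
  · rw [hP'def, List.map_append]
    refine List.pairwise_append.mpr ⟨hP2fst, List.pairwise_singleton _ _, ?_⟩
    intro a ha b hb
    simp only [List.map_cons, List.map_nil, List.mem_singleton] at hb
    subst hb
    rcases List.mem_map.mp ha with ⟨e, he, rfl⟩
    have h4 := hpend4 e (hsplit ▸ List.mem_append_right _ he)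
    omega
  · intro q hq
    have hqF := hsubF' q hq
    have h3 := hF3 q hqF
    have hqp : q ≠ p := fun he => hpnotF' (he ▸ hq)
    have : (avail.set p.toNat (t + T)).getD q.toNat 0 = avail.getD q.toNat 0 :=
      pvGetD_set_ne avail p.toNat q.toNat (t + T) (by omega)
    rw [havail2]
    exact ⟨h3.1, h3.2.1, by rw [this]; omega⟩
  · intro e he
    rw [hP'def] at he
    rcases List.mem_append.mp he with h1 | h1
    · have h4 := hpend4 e (hsplit ▸ List.mem_append_right _ h1)
      have hep : e.2 ≠ p := by
        intro hh
        exact (hdisjFP p hpmem e.2 (List.mem_map_of_mem h1)) (by omega)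
      have hset : (avail.set p.toNat (t + T)).getD e.2.toNat 0 = avail.getD e.2.toNat 0 :=
        pvGetD_set_ne avail p.toNat e.2.toNat (t + T) (by omega)
      rw [havail2]
      exact ⟨h4.1, h4.2.1, by rw [hset]; exact h4.2.2.1, by omega⟩
    · simp only [List.mem_singleton] at h1
      subst h1
      rw [havail2]
      refine ⟨hp3.1, hp3.2.1, pvGetD_set_self avail p.toNat (t + T) hptoNat, by omega⟩
  · rw [hP'def, List.map_append]
    have h1 : (F' ++ (P2.map Prod.snd ++ [(t + T, p).2])).Perm
        ((t + T, p).2 :: (F' ++ P2.map Prod.snd)) := by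
      rw [← List.append_assoc]
      exact List.perm_append_comm
    have h2 : (p :: (F' ++ P2.map Prod.snd)).Perm (F ++ P2.map Prod.snd) :=
      (hpermF.symm).append_right _
    exact (h1.trans (h2.trans (hpermFP.trans hperm)))
  · rw [hP'def]
    simp only [List.length_append, List.length_singleton]
    push_cast
    omega

lemma pvLoop_eq (N T : Int) (hN : 1 ≤ N) :
    ∀ (rest : List Int) (t : Int) (avail free : List Int) (pending : List (Int × Int))
      (outs : List Int),
    pvInv N T t avail free pending →
    (T ≤ N ∨ (pending.length : Int) + rest.length ≤ N) →
    (rest.foldl (pvStepA N T) (avail, t, outs)).2.2 =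
      (rest.foldl (pvStepB N T) (free, pending, outs, t)).2.2.1 := by
  intro rest
  induction rest with
  | nil => intro t avail free pending outs _ _; simp
  | cons pid rest ih =>
    intro t avail free pending outs hInv hcase
    have hroom : T ≤ N ∨ (pending.length : Int) + 1 ≤ N := by
      rcases hcase with h | h
      · exact Or.inl h
      · right; simp only [List.length_cons] at h; push_cast at h ⊢; omega
    obtain ⟨p, avail', free', pending', hA, hB, hInv', hlen'⟩ :=
      pvStep_eq N T t pid avail free pending outs outs hN hInv hroom
    simp only [List.foldl_cons, hA, hB]
    refine ih (t + 1) avail' free' pending' (outs ++ [p]) hInv' ?_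
    rcases hcase with h | h
    · exact Or.inl h
    · right; simp only [List.length_cons] at h; push_cast at h ⊢; omega

lemma pvInv_init (N T : Int) (hN : 1 ≤ N) :
    pvInv N T 1 (List.replicate N.toNat 0) (PySem.List.pyRange 0 N 1) [] := by
  refine ⟨by simp, PySem.List.pairwise_lt_pyRange_one 0 N, by simp, ?_, by simp, by simp⟩
  intro p hp
  have hmem := (PySem.List.mem_pyRange_one).mp hp
  refine ⟨hmem.1, by omega, ?_⟩
  have : p.toNat < N.toNat := by omega
  simp [List.getD, this]

-- ===== VERDICT (by name: the statement is the Claim_ definition above) =====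
theorem sentTimes_spec : Claim_equal_sentTimes := by
  unfold Claim_equal_sentTimes
  intro N T ids _hDom hPre
  unfold Spec_sentTimes
  rcases hPre with rfl | ⟨hN, hcase⟩
  · rfl
  · unfold sentTimes sentTimes_alt
    exact pvLoop_eq N T hN ids 1 _ _ _ [] (pvInv_init N T hN)
      (by rcases hcase with h | h
          · exact Or.inl h
          · right; simpa using h)
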